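-- pv_equiv track=rewrite | github.com/hkqai/MatClaw | mcp/tools/composition_generation/composition_enumerator.py | _generate_anion_combinations
-- ===== SOURCE A (Python) =====
-- from typing import Dict, Any, List, Optional, Annotated, Set, Tuple
--
-- def _generate_integer_partitions(n: int, num_parts: int) -> List[Tuple[int, ...]]:
--     """
--     Generate all ways to partition integer n into num_parts non-negative integers.
--
--     Example: n=3, num_parts=2 → [(0,3), (1,2), (2,1), (3,0)]
--     """
--     if num_parts == 1:
--         return [(n,)]
--
--     partitions = []
--     for i in range(n + 1):
--         for sub_partition in _generate_integer_partitions(n - i, num_parts - 1):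
--             partitions.append((i,) + sub_partition)
--
--     return partitions
--
-- def _generate_anion_combinations(
--     anions: Dict[str, List[int]],
--     required_negative_charge: int,
--     max_anions: int,
--     allow_fractional: bool = True
-- ) -> List[Dict[str, int]]:
--     """
--     Generate anion stoichiometries that provide exactly the required negative charge.
--
--     Args:
--         anions: {element: [oxidation_states]} for anions
--         required_negative_charge: Total negative charge needed (as positive integer)
--         max_anions: Maximum number of anion atoms
--         allow_fractional: Allow non-integer charge balancing
--
--     Returns:
--         List of {element: count} dictionaries for anions
--     """
--     combinations = []
--     anion_elements = list(anions.keys())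
--
--     # For simplicity, assume single oxidation state per anion for now
--     # TODO: Could be extended to handle multiple oxidation states per anion
--     anion_charges = {elem: abs(states[0]) for elem, states in anions.items()}
--
--     # Special case: single anion type
--     if len(anion_elements) == 1:
--         elem = anion_elements[0]
--         charge_per_anion = anion_charges[elem]
--
--         if allow_fractional:
--             # Allow fractional anions if charge divides evenly
--             if required_negative_charge % charge_per_anion == 0:
--                 count = required_negative_charge // charge_per_anion
--                 if count <= max_anions:
--                     return [{elem: count}]
--         else:
--             # Strict integer charge balance
--             if required_negative_charge % charge_per_anion == 0:
--                 count = required_negative_charge // charge_per_anion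
--                 if count <= max_anions:
--                     return [{elem: count}]
--         return []
--
--     # Multiple anion types - enumerate combinations
--     # For computational efficiency, limit search space
--     for total_anions in range(1, min(max_anions + 1, 30)):
--         for anion_combo in _generate_integer_partitions(total_anions, len(anion_elements)):
--             anion_stoich = {elem: count for elem, count in zip(anion_elements, anion_combo) if count > 0}
--
--             # Calculate total negative charge
--             total_negative = sum(count * anion_charges[elem] for elem, count in anion_stoich.items())
--
--             if total_negative == required_negative_charge:
--                 combinations.append(anion_stoich)
--
--     return combinations
-- ===== SOURCE B (Python) =====
-- def _generate_anion_combinations(anions, required_negative_charge, max_anions, allow_fractional=True):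
--     """Same results in the same order as the original, but instead of enumerating
--     every integer composition of each total and filtering by charge, run a pruned
--     DFS: branches whose partial charge already exceeds the target are abandoned,
--     and the last element's count is forced by the total-count equation."""
--     pairs = [(elem, abs(states[0])) for elem, states in anions.items()]
--
--     if len(pairs) == 1:
--         elem, charge = pairs[0]
--         if required_negative_charge % charge == 0:
--             count = required_negative_charge // charge
--             if count <= max_anions:
--                 return [{elem: count}]
--         return []
--
--     def dfs(suffix, rem_total, rem_charge):
--         elem, charge = suffix[0]
--         if len(suffix) == 1:
--             # the last element's count is forced by the total; check the charge equation
--             if rem_total * charge == rem_charge: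
--                 return [([(elem, rem_total)] if rem_total > 0 else [])]
--             return []
--         out = []
--         for c in range(rem_total + 1):
--             if c * charge > rem_charge:
--                 continue  # prune: charges are non-negative, this branch can never balance
--             head = [(elem, c)] if c > 0 else []
--             for tail in dfs(suffix[1:], rem_total - c, rem_charge - c * charge):
--                 out.append(head + tail)
--         return out
--
--     results = []
--     for total in range(1, min(max_anions + 1, 30)):
--         for items in dfs(pairs, total, required_negative_charge):
--             results.append(dict(items))
--     return results
-- ===== Notes on version B (the rewrite author's own statement) =====
-- stated objective: alternative
-- what changed: A enumerates every integer composition of every total and filters by charge; B runs a pruned DFS over the first k-1 elements (abandoning branches whose partial charge already exceeds the target, since charges are non-negative) and forces the last element's count from the total-count equation, visiting only branches that can still balance.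
import Mathlib
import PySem

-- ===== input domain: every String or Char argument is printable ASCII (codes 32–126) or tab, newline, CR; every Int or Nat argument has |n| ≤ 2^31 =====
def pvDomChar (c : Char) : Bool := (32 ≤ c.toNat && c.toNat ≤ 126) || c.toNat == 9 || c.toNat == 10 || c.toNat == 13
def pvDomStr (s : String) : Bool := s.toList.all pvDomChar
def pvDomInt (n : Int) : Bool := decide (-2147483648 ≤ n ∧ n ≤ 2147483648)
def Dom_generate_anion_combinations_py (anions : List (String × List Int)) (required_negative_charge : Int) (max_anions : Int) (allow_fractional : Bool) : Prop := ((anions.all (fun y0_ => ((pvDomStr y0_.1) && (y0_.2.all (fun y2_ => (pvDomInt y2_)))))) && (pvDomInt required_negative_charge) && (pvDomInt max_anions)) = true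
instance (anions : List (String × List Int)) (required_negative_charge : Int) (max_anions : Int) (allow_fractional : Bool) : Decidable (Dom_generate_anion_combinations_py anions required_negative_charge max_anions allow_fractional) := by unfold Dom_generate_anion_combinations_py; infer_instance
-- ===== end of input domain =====

-- B replaces A's enumerate-all-compositions-then-filter search by a pruned DFS that forces the
-- last element's count from the total-count equation (objective: alternative algorithm).
-- Equality of RETURN values is what is claimed (neither program mutates its arguments).

-- ===== PORT A =====

-- _generate_integer_partitions(n, num_parts); num_parts = 0 never returns in Python (excluded by Pre_), [] here
def pvPartitionsA : Int → Nat → List (List Int)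
  | n, 1 => [[n]]
  | n, k + 2 =>
      (PySem.List.pyRange 0 (n + 1) 1).foldl
        (fun partitions i =>
          partitions ++ (pvPartitionsA (n - i) (k + 1)).map (fun sub => i :: sub)) []
  | _, 0 => []

-- anion_charges[elem]; the default is unreachable: every looked-up key is a key of the dict (KeyError impossible)
def pvChargeLookup (charges : List (String × Int)) (e : String) : Int :=
  ((charges.find? (fun p => p.1 == e)).map (fun p => p.2)).getD 0

def generate_anion_combinations_py (anions : List (String × List Int)) (required_negative_charge : Int) (max_anions : Int) (allow_fractional : Bool) : List (List (String × Int)) :=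
  let anion_elements := anions.map (fun p => p.1)
  -- states[0] raises IndexError on an empty list (excluded by Pre_); the .getD 0 is unreachable there
  let anion_charges : List (String × Int) := anions.map (fun p => (p.1, |(PySem.List.pyGet? p.2 0).getD 0|))
  if anion_elements.length == 1 then
    let elem := anion_elements.headD ""
    let charge_per_anion := pvChargeLookup anion_charges elem
    if allow_fractional then
      if PySem.Int.mod required_negative_charge charge_per_anion == 0 then
        let count := PySem.Int.floordiv required_negative_charge charge_per_anion
        if count ≤ max_anions then [[(elem, count)]] else []
      else []
    else
      if PySem.Int.mod required_negative_charge charge_per_anion == 0 then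
        let count := PySem.Int.floordiv required_negative_charge charge_per_anion
        if count ≤ max_anions then [[(elem, count)]] else []
      else []
  else
    (PySem.List.pyRange 1 (min (max_anions + 1) 30) 1).foldl
      (fun combinations total_anions =>
        (pvPartitionsA total_anions anion_elements.length).foldl
          (fun combinations anion_combo =>
            let anion_stoich := (anion_elements.zip anion_combo).filter (fun p => decide (0 < p.2))
            let total_negative := (anion_stoich.map (fun p => p.2 * pvChargeLookup anion_charges p.1)).sum
            if total_negative == required_negative_charge then combinations ++ [anion_stoich]
            else combinations)
          combinations)
      []

-- ===== PORT B =====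

-- dfs(suffix, rem_total, rem_charge); only ever called with a nonempty suffix
def pvDfsB : List (String × Int) → Int → Int → List (List (String × Int))
  | [], _, _ => []
  | [(elem, charge)], rem_total, rem_charge =>
      if rem_total * charge == rem_charge then
        [if 0 < rem_total then [(elem, rem_total)] else []]
      else []
  | (elem, charge) :: p2 :: rest, rem_total, rem_charge =>
      (PySem.List.pyRange 0 (rem_total + 1) 1).foldl
        (fun out c =>
          if rem_charge < c * charge then out  -- prune: this branch can never balance
          else
            out ++ (pvDfsB (p2 :: rest) (rem_total - c) (rem_charge - c * charge)).map
              (fun tail => (if 0 < c then [(elem, c)] else []) ++ tail)) []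

def generate_anion_combinations_py_alt (anions : List (String × List Int)) (required_negative_charge : Int) (max_anions : Int) (allow_fractional : Bool) : List (List (String × Int)) :=
  let pairs : List (String × Int) := anions.map (fun p => (p.1, |(PySem.List.pyGet? p.2 0).getD 0|))
  if pairs.length == 1 then
    let elem := (pairs.headD ("", 0)).1
    let charge := (pairs.headD ("", 0)).2
    if PySem.Int.mod required_negative_charge charge == 0 then
      let count := PySem.Int.floordiv required_negative_charge charge
      if count ≤ max_anions then [[(elem, count)]] else []
    else []
  else
    (PySem.List.pyRange 1 (min (max_anions + 1) 30) 1).foldl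
      (fun results total => results ++ pvDfsB pairs total required_negative_charge) []

-- ===== PRECONDITION & SPEC =====

-- Pre_ excludes exactly the inputs where the Python A raises (empty anion dict with max_anions ≥ 1:
-- RecursionError; an empty oxidation-state list: IndexError; a single anion whose first state is 0:
-- ZeroDivisionError) and association lists with duplicate keys, which do not represent a Python dict.
def Pre_generate_anion_combinations_py (anions : List (String × List Int)) (required_negative_charge : Int) (max_anions : Int) (allow_fractional : Bool) : Prop :=
  (anions = [] → max_anions ≤ 0) ∧
  (∀ p ∈ anions, p.2 ≠ []) ∧
  (anions.map (fun p => p.1)).Nodup ∧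
  (anions.length = 1 → ((anions.headD ("", [])).2.headD 0) ≠ 0)
instance (anions : List (String × List Int)) (required_negative_charge : Int) (max_anions : Int) (allow_fractional : Bool) : Decidable (Pre_generate_anion_combinations_py anions required_negative_charge max_anions allow_fractional) := by unfold Pre_generate_anion_combinations_py; infer_instance

def pvWitness_generate_anion_combinations_py : (List (String × List Int)) × Int × Int × Bool :=
  ([("O", [-2]), ("Cl", [-1])], 4, 6, true)

def Spec_generate_anion_combinations_py (anions : List (String × List Int)) (required_negative_charge : Int) (max_anions : Int) (allow_fractional : Bool) (out : List (List (String × Int))) : Prop := out = generate_anion_combinations_py_alt anions required_negative_charge max_anions allow_fractional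
instance (anions : List (String × List Int)) (required_negative_charge : Int) (max_anions : Int) (allow_fractional : Bool) (out : List (List (String × Int))) : Decidable (Spec_generate_anion_combinations_py anions required_negative_charge max_anions allow_fractional out) := by unfold Spec_generate_anion_combinations_py; infer_instance

-- ===== CLAIM (what is proved, stated in full; the proofs are below) =====
def Claim_equal_generate_anion_combinations_py : Prop := ∀ (anions : List (String × List Int)) (required_negative_charge : Int) (max_anions : Int) (allow_fractional : Bool), Dom_generate_anion_combinations_py anions required_negative_charge max_anions allow_fractional → Pre_generate_anion_combinations_py anions required_negative_charge max_anions allow_fractional → Spec_generate_anion_combinations_py anions required_negative_charge max_anions allow_fractional (generate_anion_combinations_py anions required_negative_charge max_anions allow_fractional)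

-- ===== LEMMAS AND PROOFS =====

-- A's stoichiometry of a composition (the dict comprehension, as a list of items)
def pvStoich (elems : List String) (combo : List Int) : List (String × Int) :=
  (elems.zip combo).filter (fun p => decide (0 < p.2))

-- flatMap forms of the two loops
lemma pvPartitionsA_two (n : Int) (k : Nat) :
    pvPartitionsA n (k + 2) =
      (PySem.List.pyRange 0 (n + 1) 1).flatMap (fun i => (pvPartitionsA (n - i) (k + 1)).map (fun sub => i :: sub)) := by
  show (PySem.List.pyRange 0 (n + 1) 1).foldl _ [] = _
  rw [PySem.List.foldl_append_eq_flatMap]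
  simp

lemma pvDfsB_cons (e : String) (q : Int) (p2 : String × Int) (rest : List (String × Int)) (t r : Int) :
    pvDfsB ((e, q) :: p2 :: rest) t r =
      (PySem.List.pyRange 0 (t + 1) 1).flatMap (fun c =>
        if r < c * q then []
        else (pvDfsB (p2 :: rest) (t - c) (r - c * q)).map (fun tail => (if 0 < c then [(e, c)] else []) ++ tail)) := by
  show (PySem.List.pyRange 0 (t + 1) 1).foldl _ [] = _
  rw [PySem.List.foldl_congr_mem (g := fun out c =>
        out ++ (if r < c * q then []
          else (pvDfsB (p2 :: rest) (t - c) (r - c * q)).map (fun tail => (if 0 < c then [(e, c)] else []) ++ tail)))]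
  · rw [PySem.List.foldl_append_eq_flatMap]; simp
  · intro acc x _; by_cases h : r < x * q <;> simp [h]

-- with non-negative charges, no branch with a negative remaining charge can balance
lemma pvDfsB_nil_of_neg (pairs : List (String × Int)) (hq : ∀ p ∈ pairs, 0 ≤ p.2) (t r : Int)
    (ht : 0 ≤ t) (hr : r < 0) : pvDfsB pairs t r = [] := by
  induction pairs generalizing t r with
  | nil => simp [pvDfsB]
  | cons hd tl ih =>
    obtain ⟨e, q⟩ := hd
    have hq0 : 0 ≤ q := hq (e, q) (by simp)
    cases tl with
    | nil =>
      have : ¬ (t * q = r) := by nlinarith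
      simp [pvDfsB, this]
    | cons p2 rest =>
      rw [pvDfsB_cons]
      simp only [List.flatMap_eq_nil_iff]
      intro l hl
      rw [PySem.List.mem_pyRange_one] at hl
      by_cases h : r < l * q
      · simp [h]
      · have hlq : 0 ≤ l * q := mul_nonneg hl.1 hq0
        rw [if_neg h, ih (fun p hp => hq p (by simp [hp])) (t - l) (r - l * q) (by omega) (by omega)]
        simp

-- an association list with distinct keys looks up positionally
lemma pvChargeLookup_mem (L : List (String × Int)) (hnd : (L.map (fun p => p.1)).Nodup)
    (p : String × Int) (hp : p ∈ L) : pvChargeLookup L p.1 = p.2 := by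
  induction L with
  | nil => simp at hp
  | cons hd tl ih =>
    rcases List.mem_cons.mp hp with h | h
    · subst h; simp [pvChargeLookup]
    · simp only [List.map_cons, List.nodup_cons] at hnd
      have hne : ¬ (hd.1 = p.1) := by
        intro he
        exact hnd.1 (he ▸ List.mem_map_of_mem h)
      have := ih hnd.2 h
      simpa [pvChargeLookup, hne] using this

-- core: A's filtered compositions of one total are exactly B's pruned DFS
lemma pvMain (lk : String → Int) (pairs : List (String × Int))
    (hlk : ∀ p ∈ pairs, lk p.1 = p.2) (hq : ∀ p ∈ pairs, 0 ≤ p.2)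
    (hne : pairs ≠ []) (t r : Int) (ht : 0 ≤ t) :
    ((pvPartitionsA t pairs.length).filter
        (fun combo => ((pvStoich (pairs.map (fun p => p.1)) combo).map (fun p => p.2 * lk p.1)).sum == r)).map
      (pvStoich (pairs.map (fun p => p.1)))
      = pvDfsB pairs t r := by
  induction pairs generalizing t r with
  | nil => exact absurd rfl hne
  | cons hd tl ih =>
    obtain ⟨e, q⟩ := hd
    have hlk_e : lk e = q := hlk (e, q) (by simp)
    cases tl with
    | nil =>
      have hst : pvStoich [e] [t] = if 0 < t then [(e, t)] else [] := by
        by_cases hp : 0 < t <;> simp [pvStoich, hp]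
      have hsum1 : (List.map (fun p => p.2 * lk p.1) (pvStoich [e] [t])).sum = t * q := by
        rcases (by omega : t = 0 ∨ 0 < t) with h0 | h0
        · subst h0; rw [hst, if_neg (by omega)]; simp
        · rw [hst, if_pos h0]; simp [hlk_e]
      simp only [List.map_cons, List.map_nil, List.length_cons, List.length_nil]
      rw [show pvPartitionsA t 1 = [[t]] from rfl, List.filter_cons, List.filter_nil]
      by_cases hc : t * q = r
      · rw [if_pos (by simp [hsum1, hc])]
        simp [pvDfsB, hc, hst]
      · rw [if_neg (by simp [hsum1, hc])]
        simp [pvDfsB, hc]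
    | cons p2 rest =>
      have hlen : ((e, q) :: p2 :: rest).length = rest.length + 2 := by simp
      rw [hlen, pvPartitionsA_two, pvDfsB_cons, List.filter_flatMap, List.map_flatMap]
      refine List.flatMap_congr (fun i hi => ?_)
      rw [PySem.List.mem_pyRange_one] at hi
      have hi0 : 0 ≤ i := hi.1
      have hit : i ≤ t := by omega
      have hstoich : ∀ combo : List Int,
          pvStoich (((e, q) :: p2 :: rest).map (fun p => p.1)) (i :: combo)
            = (if 0 < i then [(e, i)] else []) ++ pvStoich ((p2 :: rest).map (fun p => p.1)) combo := by
        intro combo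
        by_cases hp : 0 < i <;> simp [pvStoich, hp]
      have hsum : ∀ combo : List Int,
          (((pvStoich (((e, q) :: p2 :: rest).map (fun p => p.1)) (i :: combo)).map
              (fun p => p.2 * lk p.1)).sum = r)
            ↔ (((pvStoich ((p2 :: rest).map (fun p => p.1)) combo).map
              (fun p => p.2 * lk p.1)).sum = r - i * q) := by
        intro combo
        rw [hstoich combo]
        by_cases hp : 0 < i
        · simp [hp, hlk_e]; omega
        · have : i = 0 := by omega
          subst this; simp
      rw [List.filter_map, List.filter_congr
        (q := fun combo => (List.map (fun p => p.2 * lk p.1)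
          (pvStoich (List.map (fun p => p.1) (p2 :: rest)) combo)).sum == r - i * q)
        (fun combo _ => by
          simp only [Function.comp_apply]
          rw [Bool.eq_iff_iff]
          simp only [beq_iff_eq]
          exact hsum combo)]
      have htl_hlk : ∀ p ∈ p2 :: rest, lk p.1 = p.2 := fun p hp => hlk p (by simp [hp])
      have htl_hq : ∀ p ∈ p2 :: rest, 0 ≤ p.2 := fun p hp => hq p (by simp [hp])
      have hIH := ih htl_hlk htl_hq (by simp) (t - i) (r - i * q) (by omega)
      simp only [List.length_cons] at hIH
      have hmaps : List.map (pvStoich (List.map (fun p => p.1) ((e, q) :: p2 :: rest)))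
            (List.map (fun sub => i :: sub)
              (List.filter (fun combo => (List.map (fun p => p.2 * lk p.1)
                  (pvStoich (List.map (fun p => p.1) (p2 :: rest)) combo)).sum == r - i * q)
                (pvPartitionsA (t - i) (rest.length + 1))))
          = List.map (fun tail => (if 0 < i then [(e, i)] else []) ++ tail)
              (pvDfsB (p2 :: rest) (t - i) (r - i * q)) := by
        rw [← hIH, List.map_map, List.map_map]
        exact List.map_congr_left (fun sub _ => hstoich sub)
      rw [hmaps]
      by_cases hcase : r < i * q
      · rw [if_pos hcase,
          pvDfsB_nil_of_neg (p2 :: rest) htl_hq (t - i) (r - i * q) (by omega) (by linarith)]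
        simp
      · rw [if_neg hcase]

-- ===== VERDICT (by name: the statement is the Claim_ definition above) =====
theorem generate_anion_combinations_py_spec : Claim_equal_generate_anion_combinations_py := by
  intro anions req mx af _hdom hpre
  obtain ⟨hemp, _hstates, hnd, _hsingle⟩ := hpre
  show generate_anion_combinations_py anions req mx af
      = generate_anion_combinations_py_alt anions req mx af
  rcases anions with _ | ⟨⟨e, s⟩, _ | ⟨p2, rest⟩⟩
  · -- empty dict: max_anions ≤ 0, both loops run over an empty range
    have hr : PySem.List.pyRange 1 (min (mx + 1) 30) 1 = [] :=
      PySem.List.pyRange_one_eq_nil (by have := hemp rfl; omega)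
    simp [generate_anion_combinations_py, generate_anion_combinations_py_alt, hr]
  · -- single anion type: both sides run the same computation
    cases af <;>
      simp [generate_anion_combinations_py, generate_anion_combinations_py_alt, pvChargeLookup]
  · -- at least two anion types
    have hnd' : ((((e, s) :: p2 :: rest).map
        (fun p => (p.1, |(PySem.List.pyGet? p.2 0).getD 0|))).map (fun p => p.1)).Nodup := by
      simpa [List.map_map, Function.comp] using hnd
    simp only [generate_anion_combinations_py, generate_anion_combinations_py_alt]
    rw [if_neg (by simp), if_neg (by simp)]
    set prs := ((e, s) :: p2 :: rest).map
      (fun p => (p.1, |(PySem.List.pyGet? p.2 0).getD 0|)) with hprs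
    have helems : List.map (fun p => p.1) ((e, s) :: p2 :: rest)
        = List.map (fun p => p.1) prs := by
      rw [hprs, List.map_map]; rfl
    have hlk : ∀ p ∈ prs, pvChargeLookup prs p.1 = p.2 :=
      fun p hp => pvChargeLookup_mem prs hnd' p hp
    have hq : ∀ p ∈ prs, 0 ≤ p.2 := by
      intro p hp
      rw [hprs] at hp
      rcases List.mem_map.mp hp with ⟨x, _, hx⟩
      rw [← hx]
      exact abs_nonneg _
    have hne : prs ≠ [] := by rw [hprs]; simp
    simp only [helems, List.length_map]
    refine Eq.trans (PySem.List.foldl_congr_mem _ _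
      (fun comb t => comb ++ (List.map (pvStoich (List.map (fun p => p.1) prs))
        ((pvPartitionsA t prs.length).filter
          (fun combo => (List.map (fun p => p.2 * pvChargeLookup prs p.1)
            (List.filter (fun p => decide (0 < p.2))
              ((List.map (fun p => p.1) prs).zip combo))).sum == req)))) _ ?_) ?_
    · intro acc t _
      exact PySem.List.foldl_append_if _ _ _ _
    · rw [PySem.List.foldl_append_eq_flatMap, PySem.List.foldl_append_eq_flatMap]
      simp only [List.nil_append]
      refine List.flatMap_congr (fun t htm => ?_)
      rw [PySem.List.mem_pyRange_one] at htm
      have hm := pvMain (fun x => pvChargeLookup prs x) prs hlk hq hne t req (by omega)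
      simpa [pvStoich] using hm
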